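-- pv_equiv track=rewrite | github.com/UMEP-dev/SUEWS | scripts/lint/check_rust_yaml_aliases.py | _find_rust_legacy_identifiers
-- ===== SOURCE A (Python) =====
-- def _find_rust_legacy_identifiers(
--     python_renames: dict[str, str],
--     rust_struct_fields: dict[str, list[tuple[str, int]]],
-- ) -> list[tuple[str, int, str, str]]:
--     """Flag Rust struct fields whose identifier is the legacy fused spelling.
--
--     ``python_renames`` is ``{new_name: old_name}``. Any Rust identifier
--     that matches an ``old_name`` in the Python registry is a failure:
--     the canonical snake_case ``new_name`` should be used instead.
--
--     Returns a list of ``(path, line_no, legacy_ident, canonical_ident)``.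
--     """
--     legacy_to_canonical = {old: new for new, old in python_renames.items()}
--     findings: list[tuple[str, int, str, str]] = []
--     for path, fields in rust_struct_fields.items():
--         for ident, line_no in fields:
--             canonical = legacy_to_canonical.get(ident)
--             if canonical is not None:
--                 findings.append((path, line_no, ident, canonical))
--     findings.sort()
--     return findings
-- ===== SOURCE B (Python) =====
-- def _find_rust_legacy_identifiers(
--     python_renames: dict[str, str],
--     rust_struct_fields: dict[str, list[tuple[str, int]]],
-- ) -> list[tuple[str, int, str, str]]:
--     """Index-based re-implementation: group Rust fields by identifier once,
--     then look each legacy spelling up in the index."""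
--     flat = [
--         (ident, (path, line_no))
--         for path, fields in rust_struct_fields.items()
--         for ident, line_no in fields
--     ]
--     rust_index: dict[str, list[tuple[str, int]]] = {}
--     for ident, loc in flat:
--         rust_index.setdefault(ident, []).append(loc)
--     legacy_to_canonical = {old: new for new, old in python_renames.items()}
--     findings = [
--         (path, line_no, old, new)
--         for old, new in legacy_to_canonical.items()
--         for path, line_no in rust_index.get(old, [])
--     ]
--     return sorted(findings)
-- ===== Notes on version B (the rewrite author's own statement) =====
-- stated objective: alternative
-- what changed: B first groups all Rust fields into an identifier-keyed index dict in one pass, then iterates the reversed rename map and looks each legacy spelling up in that index, instead of A's nested scan testing every field against the rename dict; the sort makes the traversal orders agree.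
import Mathlib
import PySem

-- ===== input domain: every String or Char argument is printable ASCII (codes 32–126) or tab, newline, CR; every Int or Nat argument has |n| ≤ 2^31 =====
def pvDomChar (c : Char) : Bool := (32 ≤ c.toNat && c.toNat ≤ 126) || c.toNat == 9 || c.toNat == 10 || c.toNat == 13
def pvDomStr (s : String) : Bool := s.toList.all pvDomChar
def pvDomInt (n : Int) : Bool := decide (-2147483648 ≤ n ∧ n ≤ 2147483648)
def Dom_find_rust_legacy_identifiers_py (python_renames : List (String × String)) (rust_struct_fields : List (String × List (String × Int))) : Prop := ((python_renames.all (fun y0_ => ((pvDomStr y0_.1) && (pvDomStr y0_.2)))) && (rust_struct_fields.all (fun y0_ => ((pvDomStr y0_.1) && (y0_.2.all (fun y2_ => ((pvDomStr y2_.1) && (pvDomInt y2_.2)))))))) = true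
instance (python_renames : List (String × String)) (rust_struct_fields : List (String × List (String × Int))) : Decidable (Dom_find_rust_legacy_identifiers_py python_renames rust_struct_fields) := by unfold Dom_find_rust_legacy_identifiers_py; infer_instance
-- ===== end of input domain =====

-- B groups all Rust fields into an identifier-keyed index in one pass and then looks each
-- legacy spelling of the reversed rename map up in it, instead of A's nested scan testing
-- every field against the rename dict (objective: alternative decomposition, same cost).

-- Python's list.sort()/sorted() on 4-tuples compares lexicographically; PySem.List.sorted
-- with this Lex-product key is exact for that order (str '<' is Python's, per PySem).
def lexKeyF (t : String × Int × String × String) : Lex (String × Lex (Int × Lex (String × String))) :=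
  toLex (t.1, toLex (t.2.1, toLex (t.2.2.1, t.2.2.2)))

def sortFindings (xs : List (String × Int × String × String)) : List (String × Int × String × String) :=
  PySem.List.sorted xs lexKeyF false

-- ===== PORT A =====
def find_rust_legacy_identifiers_py (python_renames : List (String × String)) (rust_struct_fields : List (String × List (String × Int))) : List (String × Int × String × String) :=
  -- legacy_to_canonical = {old: new for new, old in python_renames.items()}
  let legacy_to_canonical : PySem.Dict String String :=
    python_renames.foldl (fun d p => d.insert p.2 p.1) PySem.Dict.empty
  -- for path, fields in rust_struct_fields.items(): for ident, line_no in fields: …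
  let findings : List (String × Int × String × String) :=
    rust_struct_fields.foldl (fun findings pf =>
      pf.2.foldl (fun findings il =>
        match legacy_to_canonical.get? il.1 with
        | some canonical => findings ++ [(pf.1, il.2, il.1, canonical)]
        | none => findings) findings) []
  -- findings.sort()
  sortFindings findings

-- ===== PORT B =====
def find_rust_legacy_identifiers_py_alt (python_renames : List (String × String)) (rust_struct_fields : List (String × List (String × Int))) : List (String × Int × String × String) :=
  -- flat = [(ident, (path, line_no)) for path, fields in … for ident, line_no in fields]
  let flat : List (String × String × Int) :=
    rust_struct_fields.flatMap (fun pf => pf.2.map (fun il => (il.1, pf.1, il.2)))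
  -- rust_index.setdefault(ident, []).append(loc)  ==  d[ident] = d.get(ident, []) + [loc]
  let rust_index : PySem.Dict String (List (String × Int)) :=
    flat.foldl (fun d q => d.modify q.1 [] (· ++ [q.2])) PySem.Dict.empty
  let legacy_to_canonical : PySem.Dict String String :=
    python_renames.foldl (fun d p => d.insert p.2 p.1) PySem.Dict.empty
  -- [(path, line_no, old, new) for old, new in … for path, line_no in rust_index.get(old, [])]
  let findings : List (String × Int × String × String) :=
    legacy_to_canonical.items.flatMap (fun on =>
      (rust_index.getD on.1 []).map (fun pl => (pl.1, pl.2, on.1, on.2)))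
  -- sorted(findings)
  sortFindings findings

-- ===== PRECONDITION & SPEC =====
def Spec_find_rust_legacy_identifiers_py (python_renames : List (String × String)) (rust_struct_fields : List (String × List (String × Int))) (out : List (String × Int × String × String)) : Prop := out = find_rust_legacy_identifiers_py_alt python_renames rust_struct_fields
instance (python_renames : List (String × String)) (rust_struct_fields : List (String × List (String × Int))) (out : List (String × Int × String × String)) : Decidable (Spec_find_rust_legacy_identifiers_py python_renames rust_struct_fields out) := by unfold Spec_find_rust_legacy_identifiers_py; infer_instance

-- ===== CLAIM (what is proved, stated in full; the proofs are below) =====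
def Claim_equal_find_rust_legacy_identifiers_py : Prop := ∀ (python_renames : List (String × String)) (rust_struct_fields : List (String × List (String × Int))), Dom_find_rust_legacy_identifiers_py python_renames rust_struct_fields → Spec_find_rust_legacy_identifiers_py python_renames rust_struct_fields (find_rust_legacy_identifiers_py python_renames rust_struct_fields)

-- ===== LEMMAS AND PROOFS =====

lemma lexKeyF_injective : Function.Injective lexKeyF := by
  intro a b h
  obtain ⟨a1,a2,a3,a4⟩ := a; obtain ⟨b1,b2,b3,b4⟩ := b
  simp only [lexKeyF, toLex_inj, Prod.mk.injEq] at h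
  simp [h.1, h.2.1, h.2.2.1, h.2.2.2]

-- A's inner loop appends one finding per field whose ident the dict knows: it is a filterMap.
lemma foldl_match_filterMap (L : PySem.Dict String String) (p : String) :
    ∀ (l : List (String × Int)) (acc : List (String × Int × String × String)),
    l.foldl (fun acc il =>
        match L.get? il.1 with
        | some c => acc ++ [(p, il.2, il.1, c)]
        | none => acc) acc
      = acc ++ l.filterMap (fun il => (L.get? il.1).map (fun c => (p, il.2, il.1, c))) := by
  intro l
  induction l with
  | nil => simp
  | cons il t ih =>
    intro acc
    cases h : L.get? il.1 <;> simp [List.foldl_cons, h, ih]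

-- A's unsorted findings list, as a single filterMap over B's flattened field list.
lemma a_findings_eq (L : PySem.Dict String String) (rust_struct_fields : List (String × List (String × Int))) :
    rust_struct_fields.foldl (fun findings pf =>
      pf.2.foldl (fun findings il =>
        match L.get? il.1 with
        | some canonical => findings ++ [(pf.1, il.2, il.1, canonical)]
        | none => findings) findings) []
    = (rust_struct_fields.flatMap (fun pf => pf.2.map (fun il => (il.1, pf.1, il.2)))).filterMap
        (fun q => (L.get? q.1).map (fun c => (q.2.1, q.2.2, q.1, c))) := by
  have hstep : (fun (findings : List (String × Int × String × String)) (pf : String × List (String × Int)) =>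
      pf.2.foldl (fun findings il =>
        match L.get? il.1 with
        | some canonical => findings ++ [(pf.1, il.2, il.1, canonical)]
        | none => findings) findings)
      = fun findings pf =>
          findings ++ pf.2.filterMap (fun il => (L.get? il.1).map (fun c => (pf.1, il.2, il.1, c))) := by
    funext findings pf
    exact foldl_match_filterMap L pf.1 pf.2 findings
  rw [hstep, PySem.List.foldl_append_eq_flatMap, List.filterMap_flatMap]
  simp [List.filterMap_map, Function.comp]

-- sum of an if-indicator over an association list with distinct keys
lemma sum_map_if_eq (ips : List (String × String)) (hnd : (ips.map (·.1)).Nodup)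
    (key : String × String) (N : Nat) :
    (ips.map (fun on => if on = key then N else 0)).sum = if key ∈ ips then N else 0 := by
  induction ips with
  | nil => simp
  | cons on t ih =>
    simp only [List.map_cons, List.nodup_cons, List.mem_map] at hnd ⊢
    by_cases h : on = key
    · subst h
      have : ∀ x ∈ t, (if x = on then N else 0) = 0 := by
        intro x hx
        have : x ≠ on := by
          intro he; exact hnd.1 ⟨x, hx, by rw [he]⟩
        simp [this]
      simp [List.sum_cons, List.sum_eq_zero (by
        intro z hz
        obtain ⟨x, hx, rfl⟩ := List.mem_map.mp hz
        exact this x hx)]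
    · simp only [List.sum_cons, if_neg h, Nat.zero_add, ih hnd.2]
      have : (key ∈ on :: t) ↔ key ∈ t := by
        constructor
        · intro hm; rcases List.mem_cons.mp hm with rfl | hm
          · exact absurd rfl (Ne.symm h)
          · exact hm
        · exact fun hm => List.mem_cons_of_mem _ hm
      rw [if_congr this rfl rfl]

-- count of any tuple agrees between A's filterMap form and B's grouped flatMap form
lemma core_count (L : PySem.Dict String String) (hnd : L.keys.Nodup)
    (flat : List (String × String × Int)) (t : String × Int × String × String) :
    (flat.filterMap (fun q => (L.get? q.1).map (fun c => (q.2.1, q.2.2, q.1, c)))).count t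
    = (L.items.flatMap (fun on =>
        ((flat.filter (fun q => q.1 == on.1)).map (·.2)).map (fun pl => (pl.1, pl.2, on.1, on.2)))).count t := by
  obtain ⟨p, ln, id, c⟩ := t
  rw [List.count_filterMap, List.count_flatMap]
  -- each dict item contributes the count of (id, p, ln) in flat iff the item is exactly (id, c)
  have hterm : ∀ on : String × String,
      ((((flat.filter (fun q => q.1 == on.1)).map (·.2)).map (fun pl => (pl.1, pl.2, on.1, on.2))).count
        (p, ln, id, c))
      = if on = (id, c) then flat.count (id, p, ln) else 0 := by
    rintro ⟨o1, o2⟩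
    rw [List.map_map, List.count_eq_countP, List.countP_map, List.countP_filter]
    by_cases hon : (o1, o2) = (id, c)
    · rw [Prod.ext_iff] at hon
      obtain ⟨h1, h2⟩ := hon
      dsimp at h1 h2
      subst h1; subst h2
      rw [if_pos rfl, List.count_eq_countP]
      apply List.countP_congr
      rintro ⟨qi, qp, ql⟩ _
      simp only [Function.comp, beq_iff_eq, Prod.mk.injEq, Bool.and_eq_true]
      constructor <;> intro h <;> simp_all
    · rw [if_neg hon]
      apply List.countP_eq_zero.mpr
      rintro ⟨qi, qp, ql⟩ _ hq
      simp only [Function.comp, beq_iff_eq, Prod.mk.injEq, Bool.and_eq_true] at hq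
      apply hon
      rw [Prod.ext_iff]
      simp_all
  have hsum : (L.items.map (List.count (p, ln, id, c) ∘ fun on =>
      ((flat.filter (fun q => q.1 == on.1)).map (·.2)).map (fun pl => (pl.1, pl.2, on.1, on.2)))).sum
      = if (id, c) ∈ L.items then flat.count (id, p, ln) else 0 := by
    have hmaps : (L.items.map (List.count (p, ln, id, c) ∘ fun on =>
        ((flat.filter (fun q => q.1 == on.1)).map (·.2)).map (fun pl => (pl.1, pl.2, on.1, on.2))))
        = L.items.map (fun on => if on = (id, c) then flat.count (id, p, ln) else 0) := by
      apply List.map_congr_left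
      intro on _
      simpa [Function.comp] using hterm on
    rw [hmaps, sum_map_if_eq L.items hnd (id, c) (flat.count (id, p, ln))]
  rw [hsum]
  by_cases hget : L.get? id = some c
  · rw [if_pos (PySem.Dict.mem_items_of_get?_eq_some L hget), List.count_eq_countP]
    apply List.countP_congr
    rintro ⟨qi, qp, ql⟩ _
    simp only [Option.map_eq_some_iff, beq_iff_eq, Prod.mk.injEq]
    constructor <;> intro h <;> simp_all
  · have hnotm : (id, c) ∉ L.items := fun hm =>
      hget ((PySem.Dict.get?_eq_some_iff_mem_items L id c hnd).mpr hm)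
    rw [if_neg hnotm]
    apply List.countP_eq_zero.mpr
    rintro ⟨qi, qp, ql⟩ _ hq
    simp only [Option.map_eq_some_iff, beq_iff_eq, Prod.mk.injEq] at hq
    obtain ⟨cc, hc1, h1, h2, h3, h4⟩ := hq
    subst h3; subst h4
    exact hget hc1

-- ===== VERDICT (by name: the statement is the Claim_ definition above) =====
theorem find_rust_legacy_identifiers_py_spec : Claim_equal_find_rust_legacy_identifiers_py := by
  intro python_renames rust_struct_fields _
  unfold Spec_find_rust_legacy_identifiers_py
  unfold find_rust_legacy_identifiers_py find_rust_legacy_identifiers_py_alt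
  simp only []
  set L : PySem.Dict String String :=
    python_renames.foldl (fun d p => d.insert p.2 p.1) PySem.Dict.empty with hL
  set flat : List (String × String × Int) :=
    rust_struct_fields.flatMap (fun pf => pf.2.map (fun il => (il.1, pf.1, il.2))) with hflat
  have hnd : L.keys.Nodup :=
    PySem.Dict.nodup_keys_foldl_insert_key python_renames (fun p => p.2) (fun d p => p.1)
      PySem.Dict.empty PySem.Dict.nodup_keys_empty
  have hidx : ∀ o : String,
      (flat.foldl (fun d q => d.modify q.1 [] (· ++ [q.2])) PySem.Dict.empty).getD o []
      = (flat.filter (fun q => q.1 == o)).map (·.2) := by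
    intro o
    rw [PySem.Dict.getD_foldl_modify_append]
    simp
  unfold sortFindings
  apply PySem.List.sorted_eq_sorted_of_perm _ _ lexKeyF lexKeyF_injective
  rw [a_findings_eq L rust_struct_fields]
  apply List.perm_iff_count.mpr
  intro t
  rw [core_count L hnd flat t]
  apply congrArg (List.count t)
  apply List.flatMap_congr
  intro on _
  rw [hidx on.1]
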